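-- pv_equiv track=rewrite | github.com/AndyM84/embermud | embermud/util.py | one_argument
-- ===== SOURCE A (Python) =====
-- def one_argument(argument: str) -> tuple[str, str]:
--     """Pick off one argument from a string.
--
--     Returns (rest_of_string, extracted_word_lowercased).
--     Handles single-quote grouping.
--     """
--     argument = argument.lstrip()
--
--     if not argument:
--         return ("", "")
--
--     if argument[0] == "'":
--         end_char = "'"
--         argument = argument[1:]
--     else:
--         end_char = " "
--
--     arg_first = []
--     rest = argument
--     for i, ch in enumerate(argument):
--         if ch == end_char:
--             rest = argument[i + 1:]
--             break
--         arg_first.append(ch.lower())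
--     else:
--         rest = ""
--
--     return (rest.lstrip(), "".join(arg_first))
-- ===== SOURCE B (Python) =====
-- def one_argument(argument: str) -> tuple[str, str]:
--     """Pick off one (optionally single-quoted) word, lowercased.
--
--     Idiomatic rewrite: one str.partition call plus a whole-string lower
--     instead of the per-character scan.
--     """
--     argument = argument.lstrip()
--     if not argument:
--         return ("", "")
--     if argument[0] == "'":
--         delim = "'"
--         argument = argument[1:]
--     else:
--         delim = " "
--     word, _, rest = argument.partition(delim)
--     return (rest.lstrip(), word.lower())
-- ===== Notes on version B (the rewrite author's own statement) =====
-- stated objective: idiomatic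
-- what changed: Replaced the explicit enumerate loop that accumulates and lowercases one character at a time (with a for-else and a manual slice for the rest) by a single str.partition call on the selected delimiter plus one whole-string .lower().
import Mathlib
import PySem

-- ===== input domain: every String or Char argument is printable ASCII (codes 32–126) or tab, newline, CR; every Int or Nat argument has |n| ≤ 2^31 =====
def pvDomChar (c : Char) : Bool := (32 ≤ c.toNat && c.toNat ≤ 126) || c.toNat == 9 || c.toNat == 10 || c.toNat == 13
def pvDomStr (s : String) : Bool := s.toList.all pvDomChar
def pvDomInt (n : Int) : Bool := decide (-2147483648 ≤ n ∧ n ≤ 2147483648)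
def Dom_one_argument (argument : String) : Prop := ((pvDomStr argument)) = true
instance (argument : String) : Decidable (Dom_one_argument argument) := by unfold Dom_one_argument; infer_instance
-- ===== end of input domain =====

-- B replaces A's per-character accumulate-and-lower scan with a single partition
-- (takeWhile/dropWhile split at the delimiter) plus one whole-string lower (idiomatic).

-- ===== PORT A =====
-- A's for-loop over the characters: accumulates lowered chars until the first
-- end_char; returns (arg_first, rest); the for-else branch gives rest = [].
def oneArgLoopA (endc : Char) : List Char → (List Char × List Char)
  | [] => ([], [])
  | c :: cs =>
    if c = endc then ([], cs)
    else
      let p := oneArgLoopA endc cs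
      (PySem.Chars.lowerChar c :: p.1, p.2)

def one_argument (argument : String) : String × String :=
  match PySem.Chars.lstrip argument.toList with
  | [] => ("", "")
  | c :: cs =>
    let ed : Char × List Char := if c = '\'' then ('\'', cs) else (' ', c :: cs)
    let p := oneArgLoopA ed.1 ed.2
    (String.ofList (PySem.Chars.lstrip p.2), String.ofList p.1)

-- ===== PORT B =====
-- word, _, rest = target.partition(delim)  (single-char delimiter)
def one_argument_alt (argument : String) : String × String :=
  match PySem.Chars.lstrip argument.toList with
  | [] => ("", "")
  | c :: cs =>
    let dt : Char × List Char := if c = '\'' then ('\'', cs) else (' ', c :: cs)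
    let word := dt.2.takeWhile (· ≠ dt.1)
    let rest := (dt.2.dropWhile (· ≠ dt.1)).drop 1
    (String.ofList (PySem.Chars.lstrip rest), String.ofList (PySem.Chars.lower word))

-- ===== PRECONDITION & SPEC =====
def Spec_one_argument (argument : String) (out : String × String) : Prop := out = one_argument_alt argument
instance (argument : String) (out : String × String) : Decidable (Spec_one_argument argument out) := by unfold Spec_one_argument; infer_instance

-- ===== CLAIM (what is proved, stated in full; the proofs are below) =====
def Claim_equal_one_argument : Prop := ∀ (argument : String), Dom_one_argument argument → Spec_one_argument argument (one_argument argument)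

-- ===== LEMMAS AND PROOFS =====

theorem oneArgLoopA_eq (endc : Char) (l : List Char) :
    oneArgLoopA endc l =
      (PySem.Chars.lower (l.takeWhile (· ≠ endc)), (l.dropWhile (· ≠ endc)).drop 1) := by
  induction l with
  | nil => simp [oneArgLoopA, PySem.Chars.lower]
  | cons c cs ih =>
    by_cases h : c = endc <;>
      simp [oneArgLoopA, h, ih, PySem.Chars.lower]

-- ===== VERDICT (by name: the statement is the Claim_ definition above) =====
theorem one_argument_spec : Claim_equal_one_argument := by
  intro argument _
  unfold Spec_one_argument one_argument one_argument_alt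
  cases h : PySem.Chars.lstrip argument.toList with
  | nil => rfl
  | cons c cs => simp [oneArgLoopA_eq]
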